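-- pv_equiv track=rewrite | github.com/saksham-ghimire/search-engine | main/views.py | get_documents_id_in_order_of_relevancy
-- ===== SOURCE A (Python) =====
-- def get_documents_id_in_order_of_relevancy(all_relevant_documents):
--     if all_relevant_documents:
--         high_priority = set.intersection(*(map(set, all_relevant_documents)))
--         matching_documets = list({i for each in all_relevant_documents for i in each})
--
--         def sort_prioriry(x):
--             if x in high_priority:
--                 return 0, x
--             return 1, x
--
--         matching_documets.sort(key=sort_prioriry)
--         return matching_documets
--     return []
-- ===== SOURCE B (Python) =====
-- def get_documents_id_in_order_of_relevancy(all_relevant_documents):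
--     if not all_relevant_documents:
--         return []
--     n = len(all_relevant_documents)
--     # one sorted multiset of per-list deduplicated ids; a run of length n
--     # means the id occurs in every list (highest priority)
--     pool = sorted(x for doc in all_relevant_documents for x in set(doc))
--     high, low = [], []
--     i = 0
--     while i < len(pool):
--         j = i
--         while j < len(pool) and pool[j] == pool[i]:
--             j += 1
--         (high if j - i == n else low).append(pool[i])
--         i = j
--     return high + low
-- ===== Notes on version B (the rewrite author's own statement) =====
-- stated objective: alternative
-- what changed: B never computes a set intersection or a keyed sort: it sorts the concatenation of per-list deduplicated ids once and then scans the runs of equal values, sending an id to the front group exactly when its run length equals the number of lists (i.e. it occurs in every list), concatenating the two groups.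
import Mathlib
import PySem

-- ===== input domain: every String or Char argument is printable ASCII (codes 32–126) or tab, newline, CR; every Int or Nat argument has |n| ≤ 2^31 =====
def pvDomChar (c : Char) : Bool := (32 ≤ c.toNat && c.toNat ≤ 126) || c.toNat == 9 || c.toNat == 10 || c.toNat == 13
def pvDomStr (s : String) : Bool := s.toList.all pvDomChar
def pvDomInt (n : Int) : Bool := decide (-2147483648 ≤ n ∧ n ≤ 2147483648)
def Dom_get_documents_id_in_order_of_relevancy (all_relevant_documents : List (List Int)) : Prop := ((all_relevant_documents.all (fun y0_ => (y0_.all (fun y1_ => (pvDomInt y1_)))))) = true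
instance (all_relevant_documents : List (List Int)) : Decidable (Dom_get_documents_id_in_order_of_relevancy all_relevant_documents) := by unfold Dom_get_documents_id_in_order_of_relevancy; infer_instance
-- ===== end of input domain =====

-- B drops A's set intersection and keyed sort: it sorts the concatenation of per-list
-- deduplicated ids once and classifies each run of equal values by its length (a run of
-- length = number of lists means the id is common to all lists), then concatenates groups.

-- ===== PORT A =====
-- A: high = set.intersection over sets of the lists; matching = set comprehension over all
-- elements; sort with key x ↦ (0,x) if x in high else (1,x).  The key is injective on the
-- deduplicated set, so the sorted result does not depend on set iteration order.
def get_documents_id_in_order_of_relevancy (all_relevant_documents : List (List Int)) : List Int :=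
  match all_relevant_documents with
  | [] => []
  | h :: t =>
    let high : PySem.Set Int :=
      t.foldl (fun acc each => PySem.Set.inter acc (PySem.Set.ofList each)) (PySem.Set.ofList h)
    let matching_documets : PySem.Set Int :=
      (h :: t).foldl (fun acc each => each.foldl PySem.Set.add acc) PySem.Set.empty
    PySem.List.sorted2 matching_documets
      (fun x => if PySem.Set.contains high x then (0 : Int) else 1) (fun x => x) false

-- ===== PORT B =====
-- the while loop over indices i, j of Source B as structural recursion on the sorted pool:
-- one step consumes the leading run and appends its value to high or low
def pvRunScan (n : Nat) : List Int → List Int × List Int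
  | [] => ([], [])
  | x :: rest =>
    let run := rest.takeWhile (fun y => y == x)
    let rest' := rest.dropWhile (fun y => y == x)
    let p := pvRunScan n rest'
    if run.length + 1 == n then (x :: p.1, p.2) else (p.1, x :: p.2)
  termination_by xs => xs.length
  decreasing_by
    simpa [Nat.lt_succ_iff] using List.Sublist.length_le (List.dropWhile_sublist _)

def get_documents_id_in_order_of_relevancy_alt (all_relevant_documents : List (List Int)) : List Int :=
  match all_relevant_documents with
  | [] => []
  | h :: t =>
    let pool : List Int :=
      PySem.List.sorted ((h :: t).flatMap (fun d => PySem.Set.ofList d)) (fun x => x) false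
    let p := pvRunScan (h :: t).length pool
    p.1 ++ p.2

-- ===== PRECONDITION & SPEC =====
def Spec_get_documents_id_in_order_of_relevancy (all_relevant_documents : List (List Int)) (out : List Int) : Prop := out = get_documents_id_in_order_of_relevancy_alt all_relevant_documents
instance (all_relevant_documents : List (List Int)) (out : List Int) : Decidable (Spec_get_documents_id_in_order_of_relevancy all_relevant_documents out) := by unfold Spec_get_documents_id_in_order_of_relevancy; infer_instance

-- ===== CLAIM (what is proved, stated in full; the proofs are below) =====
def Claim_equal_get_documents_id_in_order_of_relevancy : Prop := ∀ (all_relevant_documents : List (List Int)), Dom_get_documents_id_in_order_of_relevancy all_relevant_documents → Spec_get_documents_id_in_order_of_relevancy all_relevant_documents (get_documents_id_in_order_of_relevancy all_relevant_documents)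

-- ===== LEMMAS AND PROOFS =====

-- Python's tuple-key sort is the plain sort under the lexicographic (Lex) key.
lemma sorted2_eq_sorted_lex {α : Type} (xs : List α) (k1 k2 : α → Int) :
    PySem.List.sorted2 xs k1 k2 false
      = PySem.List.sorted xs (fun x => toLex (k1 x, k2 x)) false := by
  show xs.foldl _ [] = xs.foldl _ []
  congr 1
  funext acc x
  congr 1
  funext a b
  by_cases h1 : k1 a < k1 b <;> by_cases h2 : k1 b < k1 a <;> by_cases h3 : k2 a < k2 b <;>
    simp [Prod.Lex.toLex_lt_toLex, h1, h2, h3] <;> omega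

-- membership in the big union (A's set comprehension)
lemma mem_foldl_add (xs : List (List Int)) (s : PySem.Set Int) (y : Int) :
    y ∈ xs.foldl (fun acc each => each.foldl PySem.Set.add acc) s
      ↔ y ∈ s ∨ ∃ l ∈ xs, y ∈ l := by
  induction xs generalizing s with
  | nil => simp
  | cons h t ih =>
    simp only [List.foldl_cons, ih, List.mem_cons]
    have : (h.foldl PySem.Set.add s) = PySem.Set.update s h := rfl
    rw [this, PySem.Set.mem_update]
    constructor
    · rintro ((hy | hy) | ⟨l, hl, hy⟩)
      · exact Or.inl hy
      · exact Or.inr ⟨h, Or.inl rfl, hy⟩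
      · exact Or.inr ⟨l, Or.inr hl, hy⟩
    · rintro (hy | ⟨l, (rfl | hl), hy⟩)
      · exact Or.inl (Or.inl hy)
      · exact Or.inl (Or.inr hy)
      · exact Or.inr ⟨l, hl, hy⟩

lemma nodup_foldl_add (xs : List (List Int)) (s : PySem.Set Int) (hs : s.Nodup) :
    (xs.foldl (fun acc each => each.foldl PySem.Set.add acc) s).Nodup := by
  induction xs generalizing s with
  | nil => exact hs
  | cons h t ih =>
    refine ih _ ?_
    show (PySem.Set.update s h).Nodup
    exact PySem.Set.nodup_update _ _ hs

-- membership in A's intersection set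
lemma mem_fold_inter (t : List (List Int)) (s : PySem.Set Int) (y : Int) :
    y ∈ t.foldl (fun acc each => PySem.Set.inter acc (PySem.Set.ofList each)) s
      ↔ y ∈ s ∧ ∀ l ∈ t, y ∈ l := by
  induction t generalizing s with
  | nil => simp
  | cons h t ih =>
    simp only [List.foldl_cons, ih, List.mem_cons]
    unfold PySem.Set.inter
    simp only [List.mem_filter, PySem.Set.contains, List.contains_iff_mem,
      PySem.Set.mem_ofList]
    constructor
    · rintro ⟨⟨hy, hh⟩, ht⟩
      exact ⟨hy, fun l hl => by rcases hl with rfl | hl; exact hh; exact ht l hl⟩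
    · rintro ⟨hy, hall⟩
      exact ⟨⟨hy, hall h (Or.inl rfl)⟩, fun l hl => hall l (Or.inr hl)⟩

-- multiplicity of y in the deduplicated concatenation = number of lists containing y
lemma count_flat (docs : List (List Int)) (y : Int) :
    (docs.flatMap (fun d => PySem.Set.ofList d)).count y
      = docs.countP (fun d => decide (y ∈ d)) := by
  induction docs with
  | nil => rfl
  | cons d ds ih =>
    simp only [List.flatMap_cons, List.count_append, List.countP_cons, ih]
    by_cases hy : y ∈ d
    · have h1 : (PySem.Set.ofList d).count y = 1 :=
        List.count_eq_one_of_mem (PySem.Set.nodup_ofList d) ((PySem.Set.mem_ofList d y).mpr hy)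
      simp [hy]; omega
    · have h0 : (PySem.Set.ofList d).count y = 0 :=
        List.count_eq_zero_of_not_mem (fun hc => hy ((PySem.Set.mem_ofList d y).mp hc))
      simp [h0, hy]

-- first element of a dropWhile fails the predicate, rest of helper facts
lemma run_scan_spec (n : Nat) (N : Nat) (xs : List Int) (hN : xs.length ≤ N) (hs : xs.Pairwise (· ≤ ·)) :
    (∀ y, y ∈ (pvRunScan n xs).1 ↔ y ∈ xs ∧ xs.count y = n) ∧
    (∀ y, y ∈ (pvRunScan n xs).2 ↔ y ∈ xs ∧ xs.count y ≠ n) ∧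
    (pvRunScan n xs).1.Pairwise (· < ·) ∧ (pvRunScan n xs).2.Pairwise (· < ·) := by
  induction N generalizing xs with
  | zero =>
    have : xs = [] := List.eq_nil_of_length_eq_zero (Nat.le_zero.mp hN)
    subst this; simp [pvRunScan]
  | succ M ihN =>
    match xs with
    | [] => simp [pvRunScan]
    | x :: rest =>
    -- basic facts about the decomposition
    have hsplit : x :: rest = x :: (rest.takeWhile (fun y => y == x) ++ rest.dropWhile (fun y => y == x)) := by
      rw [List.takeWhile_append_dropWhile]
    have hle : ∀ y ∈ rest, x ≤ y := fun y hy => List.rel_of_pairwise_cons hs hy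
    have hrest_pw : rest.Pairwise (· ≤ ·) := hs.of_cons
    have hsub : (rest.dropWhile (fun y => y == x)).Sublist rest := List.dropWhile_sublist _
    have hpw' : (rest.dropWhile (fun y => y == x)).Pairwise (· ≤ ·) := hrest_pw.sublist hsub
    have hmemrun : ∀ y ∈ rest.takeWhile (fun y => y == x), y = x := by
      intro y hy
      have := List.mem_takeWhile_imp hy
      simpa using this
    -- every element after the run is strictly greater than x
    have hlt : ∀ y ∈ rest.dropWhile (fun y => y == x), x < y := by
      rcases hd : rest.dropWhile (fun y => y == x) with _ | ⟨z, w⟩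
      · intro y hy; cases hy
      · have hz : (fun y => y == x) ((rest.dropWhile (fun y => y == x)).head (by rw [hd]; simp)) = false :=
          List.head_dropWhile_not (fun y => y == x) (by rw [hd]; simp)
        have hzx : z ≠ x := by
          simp only [hd, List.head_cons] at hz; simpa using hz
        have hzmem : z ∈ rest.dropWhile (fun y => y == x) := by rw [hd]; exact List.mem_cons_self
        have hxz : x < z := lt_of_le_of_ne (hle z (hsub.mem hzmem)) (Ne.symm hzx)
        intro y hy
        rcases List.mem_cons.mp hy with rfl | hy
        · exact hxz
        · have hpw'' := hpw'
          rw [hd] at hpw''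
          exact lt_of_lt_of_le hxz (List.rel_of_pairwise_cons hpw'' hy)
    have hxnot : x ∉ rest.dropWhile (fun y => y == x) := fun hc => lt_irrefl x (hlt x hc)
    -- counts
    have hcount_x : (x :: rest).count x = (rest.takeWhile (fun y => y == x)).length + 1 := by
      conv_lhs => rw [hsplit]
      rw [List.count_cons_self, List.count_append]
      have h1 : (rest.takeWhile (fun y => y == x)).count x = (rest.takeWhile (fun y => y == x)).length := by
        apply List.count_eq_length.mpr
        intro y hy; exact (by simpa using (hmemrun y hy).symm)
      have h2 : (rest.dropWhile (fun y => y == x)).count x = 0 :=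
        List.count_eq_zero_of_not_mem hxnot
      omega
    have hcount_ne : ∀ y, y ≠ x → (x :: rest).count y = (rest.dropWhile (fun y => y == x)).count y := by
      intro y hyx
      conv_lhs => rw [hsplit]
      rw [List.count_cons_of_ne (Ne.symm hyx), List.count_append]
      have h1 : (rest.takeWhile (fun y => y == x)).count y = 0 :=
        List.count_eq_zero_of_not_mem (fun hc => hyx (hmemrun y hc))
      omega
    have hmem_iff : ∀ y, y ∈ x :: rest ↔ y = x ∨ y ∈ rest.dropWhile (fun y => y == x) := by
      intro y
      constructor
      · intro hy
        by_cases hyx : y = x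
        · exact Or.inl hyx
        · rcases List.mem_cons.mp hy with rfl | hy
          · exact absurd rfl hyx
          rw [← List.takeWhile_append_dropWhile (p := fun y => y == x) (l := rest)] at hy
          rcases List.mem_append.mp hy with h | h
          · exact absurd (hmemrun y h) hyx
          · exact Or.inr h
      · rintro (rfl | hy)
        · exact List.mem_cons_self
        · exact List.mem_cons_of_mem _ (hsub.mem hy)
    have hlen : (rest.dropWhile (fun y => y == x)).length ≤ M := by
      have := List.Sublist.length_le hsub
      simp only [List.length_cons] at hN
      omega
    obtain ⟨ih1, ih2, ih3, ih4⟩ := ihN _ hlen hpw'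
    -- the characterisation used on both branches
    have hchar : ∀ y (m : Nat), (y ∈ x :: rest ∧ (x :: rest).count y = m) ↔
        (y = x ∧ (rest.takeWhile (fun y => y == x)).length + 1 = m) ∨
        (y ∈ rest.dropWhile (fun y => y == x) ∧ (rest.dropWhile (fun y => y == x)).count y = m) := by
      intro y m
      by_cases hyx : y = x
      · subst hyx
        constructor
        · rintro ⟨-, h⟩
          exact Or.inl ⟨rfl, by rw [← hcount_x]; exact h⟩
        · rintro (⟨-, h⟩ | ⟨hc, -⟩)
          · exact ⟨List.mem_cons_self, by rw [hcount_x]; exact h⟩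
          · exact absurd hc hxnot
      · rw [show ((y ∈ x :: rest ∧ (x :: rest).count y = m) ↔ (y ∈ x :: rest ∧ (rest.dropWhile (fun y => y == x)).count y = m)) from by rw [hcount_ne y hyx], hmem_iff]
        constructor
        · rintro ⟨(rfl | h), hc⟩
          · exact absurd rfl hyx
          · exact Or.inr ⟨h, hc⟩
        · rintro (⟨rfl, -⟩ | ⟨h, hc⟩)
          · exact absurd rfl hyx
          · exact ⟨Or.inr h, hc⟩
    by_cases hn : (rest.takeWhile (fun y => y == x)).length + 1 = n
    · have he : pvRunScan n (x :: rest)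
          = (x :: (pvRunScan n (rest.dropWhile (fun y => y == x))).1,
             (pvRunScan n (rest.dropWhile (fun y => y == x))).2) := by
        rw [pvRunScan]; simp [hn]
      simp only [he]
      refine ⟨?_, ?_, ?_, ih4⟩
      · intro y
        rw [List.mem_cons, ih1 y, hchar y n]
        constructor
        · rintro (rfl | h)
          · exact Or.inl ⟨rfl, hn⟩
          · exact Or.inr h
        · rintro (⟨rfl, -⟩ | h)
          · exact Or.inl rfl
          · exact Or.inr h
      · intro y
        rw [ih2 y]
        constructor
        · rintro ⟨hy, hc⟩
          refine ⟨hmem_iff y |>.mpr (Or.inr hy), ?_⟩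
          have : y ≠ x := fun h => hxnot (h ▸ hy)
          rw [hcount_ne y this]; exact hc
        · rintro ⟨hy, hc⟩
          have hy' : y = x ∨ y ∈ rest.dropWhile (fun y => y == x) := (hmem_iff y).mp hy
          rcases hy' with rfl | hy'
          · exact absurd hn (by rw [hcount_x] at hc; omega)
          · have : y ≠ x := fun h => hxnot (h ▸ hy')
            rw [hcount_ne y this] at hc
            exact ⟨hy', hc⟩
      · refine List.pairwise_cons.mpr ⟨?_, ih3⟩
        intro y hy
        exact hlt y ((ih1 y).mp hy).1
    · have he : pvRunScan n (x :: rest)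
          = ((pvRunScan n (rest.dropWhile (fun y => y == x))).1,
             x :: (pvRunScan n (rest.dropWhile (fun y => y == x))).2) := by
        rw [pvRunScan]; simp only [beq_iff_eq, if_neg hn]
      simp only [he]
      refine ⟨?_, ?_, ih3, ?_⟩
      · intro y
        rw [ih1 y]
        constructor
        · rintro ⟨hy, hc⟩
          refine ⟨hmem_iff y |>.mpr (Or.inr hy), ?_⟩
          have : y ≠ x := fun h => hxnot (h ▸ hy)
          rw [hcount_ne y this]; exact hc
        · rintro ⟨hy, hc⟩
          rcases (hmem_iff y).mp hy with rfl | hy'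
          · rw [hcount_x] at hc; exact absurd hc hn
          · have : y ≠ x := fun h => hxnot (h ▸ hy')
            rw [hcount_ne y this] at hc
            exact ⟨hy', hc⟩
      · intro y
        rw [List.mem_cons, ih2 y]
        constructor
        · rintro (rfl | ⟨hy, hc⟩)
          · exact ⟨List.mem_cons_self, by rw [hcount_x]; exact hn⟩
          · refine ⟨hmem_iff y |>.mpr (Or.inr hy), ?_⟩
            have : y ≠ x := fun h => hxnot (h ▸ hy)
            rw [hcount_ne y this]; exact hc
        · rintro ⟨hy, hc⟩
          rcases (hmem_iff y).mp hy with rfl | hy'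
          · exact Or.inl rfl
          · have : y ≠ x := fun h => hxnot (h ▸ hy')
            rw [hcount_ne y this] at hc
            exact Or.inr ⟨hy', hc⟩
      · refine List.pairwise_cons.mpr ⟨?_, ih4⟩
        intro y hy
        exact hlt y ((ih2 y).mp hy).1

theorem get_documents_id_in_order_of_relevancy_spec_aux (h : List Int) (t : List (List Int)) :
    get_documents_id_in_order_of_relevancy (h :: t)
      = get_documents_id_in_order_of_relevancy_alt (h :: t) := by
  -- name the pieces
  set highA : PySem.Set Int :=
    t.foldl (fun acc each => PySem.Set.inter acc (PySem.Set.ofList each)) (PySem.Set.ofList h) with hhighA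
  set U : PySem.Set Int :=
    (h :: t).foldl (fun acc each => each.foldl PySem.Set.add acc) PySem.Set.empty with hU
  set flat : List Int := (h :: t).flatMap (fun d => PySem.Set.ofList d) with hflat
  set pool : List Int := PySem.List.sorted flat (fun x => x) false with hpool
  set n : Nat := (h :: t).length with hn
  -- membership characterizations
  have hmemU : ∀ y, y ∈ U ↔ ∃ l ∈ h :: t, y ∈ l := by
    intro y; rw [hU, mem_foldl_add]; simp [PySem.Set.empty]
  have hmemA : ∀ y, y ∈ highA ↔ y ∈ h ∧ ∀ l ∈ t, y ∈ l := by
    intro y; rw [hhighA, mem_fold_inter]; simp [PySem.Set.mem_ofList]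
  have hUnd : U.Nodup := nodup_foldl_add _ _ List.nodup_nil
  -- pool facts
  have hpool_perm : pool.Perm flat := PySem.List.sorted_perm _ _ _
  have hpool_pw : pool.Pairwise (· ≤ ·) := by
    have := PySem.List.sorted_pairwise flat (fun x : Int => x) (κ := Int)
    simpa using this
  have hcount : ∀ y, pool.count y = (h :: t).countP (fun d => decide (y ∈ d)) := by
    intro y; rw [hpool_perm.count_eq, hflat, count_flat]
  have hmempool : ∀ y, y ∈ pool ↔ ∃ l ∈ h :: t, y ∈ l := by
    intro y
    rw [hpool_perm.mem_iff, hflat, List.mem_flatMap]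
    constructor
    · rintro ⟨d, hd, hy⟩; exact ⟨d, hd, (PySem.Set.mem_ofList d y).mp hy⟩
    · rintro ⟨d, hd, hy⟩; exact ⟨d, hd, (PySem.Set.mem_ofList d y).mpr hy⟩
  -- count = n iff member of every list
  have hcount_iff : ∀ y, y ∈ pool → (pool.count y = n ↔ (y ∈ h ∧ ∀ l ∈ t, y ∈ l)) := by
    intro y _
    rw [hcount]
    constructor
    · intro hc
      have hall := List.countP_eq_length.mp (by rw [hc])
      exact ⟨by simpa using hall h List.mem_cons_self,
        fun l hl => by simpa using hall l (List.mem_cons_of_mem _ hl)⟩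
    · rintro ⟨hy, hall⟩
      apply List.countP_eq_length.mpr
      intro d hd
      rcases hd with _ | hd
      · simpa using hy
      · simpa using hall d (by assumption)
  -- the run scan
  obtain ⟨s1, s2, s3, s4⟩ := run_scan_spec n pool.length pool le_rfl hpool_pw
  set hi : List Int := (pvRunScan n pool).1 with hhi
  set lo : List Int := (pvRunScan n pool).2 with hlo
  -- A's side rewritten as a lex sort
  show PySem.List.sorted2 U _ _ false = _
  rw [sorted2_eq_sorted_lex]
  show _ = hi ++ lo
  apply PySem.List.sorted_eq_of_perm_of_pairwise_lt
  · -- hi ++ lo is a permutation of U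
    have hnodup : (hi ++ lo).Nodup := by
      rw [List.nodup_append]
      have h3 : hi.Pairwise (· ≠ ·) := s3.imp (fun h => ne_of_lt h)
      have h4 : lo.Pairwise (· ≠ ·) := s4.imp (fun h => ne_of_lt h)
      refine ⟨h3, h4, ?_⟩
      · intro y hy z hz
        rintro rfl
        exact ((s2 y).mp hz).2 ((s1 y).mp hy).2
    apply (List.perm_ext_iff_of_nodup hnodup hUnd).mpr
    intro y
    rw [List.mem_append, s1 y, s2 y, hmemU, ← hmempool]
    constructor
    · rintro (⟨hy, -⟩ | ⟨hy, -⟩) <;> exact hy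
    · intro hy
      by_cases hc : pool.count y = n
      · exact Or.inl ⟨hy, hc⟩
      · exact Or.inr ⟨hy, hc⟩
  · -- hi ++ lo is strictly increasing under the lex key
    have hkey0 : ∀ y ∈ hi, (if PySem.Set.contains highA y then (0 : Int) else 1) = 0 := by
      intro y hy
      obtain ⟨hmem, hc⟩ := (s1 y).mp hy
      have : PySem.Set.contains highA y = true := by
        simp only [PySem.Set.contains, List.contains_iff_mem]
        exact (hmemA y).mpr ((hcount_iff y hmem).mp hc)
      rw [this]; simp
    have hkey1 : ∀ y ∈ lo, (if PySem.Set.contains highA y then (0 : Int) else 1) = 1 := by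
      intro y hy
      obtain ⟨hmem, hc⟩ := (s2 y).mp hy
      have : PySem.Set.contains highA y = false := by
        rw [Bool.eq_false_iff]
        intro hcont
        apply hc
        apply (hcount_iff y hmem).mpr
        apply (hmemA y).mp
        simpa [PySem.Set.contains, List.contains_iff_mem] using hcont
      rw [this]; simp
    rw [List.pairwise_append]
    refine ⟨?_, ?_, ?_⟩
    · apply List.Pairwise.imp_of_mem ?_ s3
      intro a b ha hb hab
      rw [Prod.Lex.toLex_lt_toLex]
      exact Or.inr ⟨by rw [hkey0 a ha, hkey0 b hb], hab⟩
    · apply List.Pairwise.imp_of_mem ?_ s4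
      intro a b ha hb hab
      rw [Prod.Lex.toLex_lt_toLex]
      exact Or.inr ⟨by rw [hkey1 a ha, hkey1 b hb], hab⟩
    · intro a ha b hb
      rw [Prod.Lex.toLex_lt_toLex]
      exact Or.inl (by rw [hkey0 a ha, hkey1 b hb]; norm_num)

-- ===== VERDICT (by name: the statement is the Claim_ definition above) =====
theorem get_documents_id_in_order_of_relevancy_spec : Claim_equal_get_documents_id_in_order_of_relevancy := by
  intro all _
  unfold Spec_get_documents_id_in_order_of_relevancy
  match all with
  | [] => rfl
  | h :: t => exact get_documents_id_in_order_of_relevancy_spec_aux h t
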